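-- pv_equiv track=rewrite | github.com/1153470104/chinese_poetry | wrangle/surfix_wrangle.py | list_get_surfix
-- ===== SOURCE A (Python) =====
-- def word_match(ss, loc, pos):
--     loc_len = len(loc)
--     str_len = len(ss)
--     if pos + loc_len > str_len:
--         return False
--     j = 0
--     for l in loc:
--         if ss[pos + j] != l:
--             return False
--         j = j+1
--     return True
--
-- def simple_get_surfix(ss, loc):
--     loc_len = len(loc)
--     str_len = len(ss)
--     if loc in ss:
--         for j in range(str_len):
--             if word_match(ss, loc, j) and j + loc_len < str_len:
--                 return ss[j+loc_len]
--     return ""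
--
-- def list_get_surfix(ss, loc_list):
--     if ss == "":
--         return ""
--     for l in loc_list:
--         surfix = simple_get_surfix(ss, l)
--         if surfix != "":
--             return surfix
--     return ""
-- ===== SOURCE B (Python) =====
-- def list_get_surfix(ss, loc_list):
--     # One native find() per loc: if the first occurrence of l has no following
--     # char it ends at len(ss), so no other occurrence can exist; no per-position scan.
--     n = len(ss)
--     for l in loc_list:
--         j = ss.find(l)
--         k = j + len(l)
--         if j != -1 and k < n:
--             return ss[k]
--     return ""
-- ===== Notes on version B (the rewrite author's own statement) =====
-- stated objective: idiomatic
-- what changed: Replaces the hand-written per-position word_match scan (plus a redundant 'in' pre-check) by a single str.find per loc, using the fact that an occurrence lacking a following char must be the unique last-position occurrence.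
import Mathlib
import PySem

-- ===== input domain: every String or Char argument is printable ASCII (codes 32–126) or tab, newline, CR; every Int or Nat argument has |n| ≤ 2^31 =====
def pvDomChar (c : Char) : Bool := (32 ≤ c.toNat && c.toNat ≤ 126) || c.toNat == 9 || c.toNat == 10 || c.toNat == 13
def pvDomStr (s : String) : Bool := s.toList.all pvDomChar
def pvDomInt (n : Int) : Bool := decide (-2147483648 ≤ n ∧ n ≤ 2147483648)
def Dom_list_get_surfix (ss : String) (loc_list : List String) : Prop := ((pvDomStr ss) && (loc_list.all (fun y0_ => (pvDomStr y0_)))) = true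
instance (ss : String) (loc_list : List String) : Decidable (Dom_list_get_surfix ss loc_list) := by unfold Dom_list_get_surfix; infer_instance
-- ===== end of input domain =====

-- B replaces A's hand-written per-position match scan by one find per loc; proved equal on all inputs.


-- ===== PORT A =====
-- the inner 'for l in loc' of word_match (j is the running offset)
def wmLoop (ss : List Char) (loc : List Char) (pos : Int) (j : Int) : Bool :=
  match loc with
  | [] => true
  | l :: rest =>
    match PySem.List.pyGet? ss (pos + j) with
    | some c => if c ≠ l then false else wmLoop ss rest pos (j + 1)
    | none => false   -- unreachable: the guard pos + len(loc) ≤ len(ss) keeps every index in range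

def word_match (ss : List Char) (loc : List Char) (pos : Int) : Bool :=
  let loc_len : Int := loc.length
  let str_len : Int := ss.length
  if pos + loc_len > str_len then false
  else wmLoop ss loc pos 0

-- the 'for j in range(str_len)' of simple_get_surfix, with its early return
def sgsLoop (ss : List Char) (loc : List Char) (js : List Int) : String :=
  match js with
  | [] => ""
  | j :: rest =>
    if word_match ss loc j && decide (j + (loc.length : Int) < (ss.length : Int)) then
      match PySem.List.pyGet? ss (j + (loc.length : Int)) with
      | some c => String.ofList [c]
      | none => ""   -- unreachable: the loop condition puts j + loc_len in range
    else sgsLoop ss loc rest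

def simple_get_surfix (ss : String) (loc : String) : String :=
  if PySem.Str.isIn loc ss then
    sgsLoop ss.toList loc.toList (PySem.List.pyRange 0 (ss.toList.length : Int) 1)
  else ""

def lgsLoop (ss : String) (loc_list : List String) : String :=
  match loc_list with
  | [] => ""
  | l :: rest =>
    let surfix := simple_get_surfix ss l
    if surfix ≠ "" then surfix else lgsLoop ss rest

def list_get_surfix (ss : String) (loc_list : List String) : String :=
  if ss = "" then "" else lgsLoop ss loc_list

-- ===== PORT B =====
def altLoop (s : List Char) (n : Int) (loc_list : List String) : String :=
  match loc_list with
  | [] => ""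
  | l :: rest =>
    let j := PySem.Chars.find s l.toList
    let k := j + (l.toList.length : Int)
    if j ≠ -1 ∧ k < n then
      match PySem.List.pyGet? s k with
      | some c => String.ofList [c]
      | none => ""   -- unreachable: 0 ≤ j and k < n keep k in range
    else altLoop s n rest

def list_get_surfix_alt (ss : String) (loc_list : List String) : String :=
  altLoop ss.toList (ss.toList.length : Int) loc_list

-- ===== PRECONDITION & SPEC =====
def Spec_list_get_surfix (ss : String) (loc_list : List String) (out : String) : Prop := out = list_get_surfix_alt ss loc_list
instance (ss : String) (loc_list : List String) (out : String) : Decidable (Spec_list_get_surfix ss loc_list out) := by unfold Spec_list_get_surfix; infer_instance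

-- ===== CLAIM (what is proved, stated in full; the proofs are below) =====
def Claim_equal_list_get_surfix : Prop := ∀ (ss : String) (loc_list : List String), Dom_list_get_surfix ss loc_list → Spec_list_get_surfix ss loc_list (list_get_surfix ss loc_list)

-- ===== LEMMAS AND PROOFS =====

lemma pyGet?_some (s : List Char) (i : Int) (h0 : 0 ≤ i) (hlt : i < (s.length : Int)) :
    PySem.List.pyGet? s i = some (s[i.toNat]'(by omega)) := by
  have h1 : PySem.List.pyGet? s i = s[i.toNat]? := by
    conv_lhs => rw [show i = ((i.toNat : Nat) : Int) from by omega]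
    rw [PySem.List.pyGet?_natCast]
  rw [h1, List.getElem?_eq_getElem (by omega)]

-- wmLoop succeeds iff loc is a prefix of the rest of the string at pos + j
lemma wmLoop_iff (s : List Char) (t : List Char) (pos : Int) : ∀ j : Int, 0 ≤ pos + j →
    pos + j + (t.length : Int) ≤ (s.length : Int) →
    (wmLoop s t pos j = true ↔ t <+: s.drop (pos + j).toNat) := by
  induction t with
  | nil => intro j h0 hle; simp [wmLoop]
  | cons c rest ih =>
    intro j h0 hle
    have hlt : (pos + j).toNat < s.length := by
      simp only [List.length_cons] at hle; push_cast at hle; omega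
    rw [wmLoop, pyGet?_some s (pos + j) h0 (by omega)]
    rw [List.drop_eq_getElem_cons hlt, List.cons_prefix_cons]
    have ih' := ih (j + 1) (by omega) (by simp only [List.length_cons] at hle; push_cast at hle ⊢; omega)
    have harg : pos + (j + 1) = pos + j + 1 := by omega
    have htn : (pos + j + 1).toNat = (pos + j).toNat + 1 := by omega
    rw [harg, htn] at ih'
    by_cases hc : s[(pos + j).toNat] = c
    · simp [hc, ih']
    · simp [hc, Ne.symm hc]

-- word_match at a position inside the string is exactly "t is a prefix of s from pos"
lemma word_match_iff (s t : List Char) (pos : Int) (hpos : 0 ≤ pos) (hlt : pos < (s.length : Int)) :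
    (word_match s t pos = true ↔ t <+: s.drop pos.toNat) := by
  unfold word_match
  by_cases hg : pos + (t.length : Int) > (s.length : Int)
  · simp only [hg, if_true]
    constructor
    · intro h; cases h
    · intro h
      have := h.length_le
      rw [List.length_drop] at this
      omega
  · simp only [hg, if_false]
    have := wmLoop_iff s t pos 0 (by omega) (by omega)
    rwa [add_zero] at this

-- if no index in [a, b) passes the loop test, the scan returns ""
lemma sgsLoop_none (s t : List Char) (b : Int) : ∀ (n : Nat) (a : Int), (b - a).toNat = n →
    (∀ j, a ≤ j → j < b →
      (word_match s t j && decide (j + (t.length : Int) < (s.length : Int))) = false) →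
    sgsLoop s t (PySem.List.pyRange a b 1) = "" := by
  intro n
  induction n with
  | zero =>
    intro a hn _
    rw [PySem.List.pyRange_one_eq_nil (by omega)]; rfl
  | succ k ih =>
    intro a hn h
    rw [PySem.List.pyRange_one_cons (by omega), sgsLoop]
    rw [h a le_rfl (by omega)]
    simp only [Bool.false_eq_true, if_false]
    exact ih (a + 1) (by omega) (fun j hj1 hj2 => h j (by omega) hj2)

-- if f is the first index in [a, b) passing the loop test, the scan returns s[f + |t|]
lemma sgsLoop_hit (s t : List Char) (b f : Int) (hf : f < b)
    (hP : (word_match s t f && decide (f + (t.length : Int) < (s.length : Int))) = true) :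
    ∀ (n : Nat) (a : Int), (f - a).toNat = n → a ≤ f →
    (∀ j, a ≤ j → j < f →
      (word_match s t j && decide (j + (t.length : Int) < (s.length : Int))) = false) →
    sgsLoop s t (PySem.List.pyRange a b 1) =
      (match PySem.List.pyGet? s (f + (t.length : Int)) with
       | some c => String.ofList [c]
       | none => "") := by
  intro n
  induction n with
  | zero =>
    intro a hn ha _
    have haf : a = f := by omega
    subst haf
    rw [PySem.List.pyRange_one_cons (by omega), sgsLoop, hP]
    simp
  | succ k ih =>
    intro a hn ha h
    rw [PySem.List.pyRange_one_cons (by omega), sgsLoop]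
    rw [h a le_rfl (by omega)]
    simp only [Bool.false_eq_true, if_false]
    exact ih (a + 1) (by omega) (by omega) (fun j hj1 hj2 => h j (by omega) hj2)

-- prefix at position i forces i + |t| ≤ |s|  (for i ≤ |s|)
lemma prefix_len_le (s t : List Char) (i : Nat) (hi : i ≤ s.length) (h : t <+: s.drop i) :
    i + t.length ≤ s.length := by
  have := h.length_le
  rw [List.length_drop] at this
  omega

-- the per-loc results of A and B coincide
lemma perloc (ss l : String) :
    simple_get_surfix ss l =
      (let j := PySem.Chars.find ss.toList l.toList
       let k := j + (l.toList.length : Int)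
       if j ≠ -1 ∧ k < (ss.toList.length : Int) then
         match PySem.List.pyGet? ss.toList k with
         | some c => String.ofList [c]
         | none => ""
       else "") := by
  set s := ss.toList with hs
  set t := l.toList with ht
  set f := PySem.Chars.find s t with hfdef
  unfold simple_get_surfix
  rw [PySem.Str.isIn_eq, ← hs, ← ht]
  by_cases hin : PySem.Chars.isIn t s = true
  · have hinf : t <:+: s := (PySem.Chars.isIn_iff_infix t s).mp hin
    have hf0 : 0 ≤ f := (PySem.Chars.find_nonneg_iff s t).mpr hinf
    obtain ⟨hpre, hmin⟩ := PySem.Chars.find_spec hf0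
    have hfle : f ≤ (s.length : Int) := PySem.Chars.find_le_length s t
    have hflen : f.toNat + t.length ≤ s.length :=
      prefix_len_le s t f.toNat (by omega) hpre
    have hne : f ≠ -1 := by omega
    by_cases hk : f + (t.length : Int) < (s.length : Int)
    · -- first occurrence has a following char: both return s[f + |t|]
      simp only [hin, if_true, hne, hk, ne_eq, not_false_iff, and_self]
      have hflt : f < (s.length : Int) := by omega
      have hPf : (word_match s t f && decide (f + (t.length : Int) < (s.length : Int))) = true := by
        rw [Bool.and_eq_true, decide_eq_true_iff]
        exact ⟨(word_match_iff s t f hf0 hflt).mpr hpre, hk⟩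
      have hno : ∀ j, (0:Int) ≤ j → j < f →
          (word_match s t j && decide (j + (t.length : Int) < (s.length : Int))) = false := by
        intro j hj1 hj2
        have hwm : word_match s t j = false := by
          rw [Bool.eq_false_iff]
          intro hw
          exact hmin j.toNat (by omega) ((word_match_iff s t j hj1 (by omega)).mp hw)
        rw [hwm, Bool.false_and]
      exact sgsLoop_hit s t (s.length : Int) f hflt hPf (f - 0).toNat 0 rfl (by omega) hno
    · -- the only occurrence ends the string: both return ""
      simp only [hin, if_true, hk, and_false, if_false]
      have hfeq : f.toNat + t.length = s.length := by omega
      apply sgsLoop_none s t (s.length : Int) ((s.length : Int) - 0).toNat 0 rfl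
      intro j hj1 hj2
      rw [Bool.and_eq_false_iff]
      by_cases hjl : j + (t.length : Int) < (s.length : Int)
      · left
        rw [Bool.eq_false_iff]
        intro hw
        have hp := (word_match_iff s t j hj1 hj2).mp hw
        exact hmin j.toNat (by omega) hp
      · right; simp [hjl]
  · -- loc not in ss: find = -1, both return ""
    have hf : f = -1 := by
      rw [hfdef]
      exact (PySem.Chars.find_eq_neg_one_iff s t).mpr
        (fun h => hin ((PySem.Chars.isIn_iff_infix t s).mpr h))
    simp [hin, hf]

lemma loops_eq (ss : String) : ∀ ls : List String,
    lgsLoop ss ls = altLoop ss.toList (ss.toList.length : Int) ls := by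
  intro ls
  induction ls with
  | nil => rfl
  | cons l rest ih =>
    rw [lgsLoop, altLoop]
    simp only [perloc]
    set s := ss.toList
    set t := l.toList
    set f := PySem.Chars.find s t with hfdef
    by_cases hc : f ≠ -1 ∧ f + (t.length : Int) < (s.length : Int)
    · have hf0 : 0 ≤ f := by
        have := PySem.Chars.neg_one_le_find s t
        omega
      rw [pyGet?_some s (f + (t.length : Int)) (by omega) hc.2]
      simp only [hc]
      simp [hc.1]
    · simp only [hc, if_false]
      simp [ih]

lemma altLoop_nil_str : ∀ ls : List String, altLoop [] 0 ls = "" := by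
  intro ls
  induction ls with
  | nil => rfl
  | cons l rest ih =>
    rw [altLoop]
    have h : ¬ (PySem.Chars.find [] l.toList ≠ -1 ∧
        PySem.Chars.find [] l.toList + (l.toList.length : Int) < 0) := by
      have h1 := PySem.Chars.neg_one_le_find [] l.toList
      intro ⟨ha, hb⟩
      have : (0:Int) ≤ (l.toList.length : Int) := by positivity
      omega
    simp only [h, if_false]
    exact ih

-- ===== VERDICT (by name: the statement is the Claim_ definition above) =====
theorem list_get_surfix_spec : Claim_equal_list_get_surfix := by
  intro ss ls _
  show _ = _
  unfold list_get_surfix list_get_surfix_alt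
  by_cases h : ss = ""
  · subst h
    simp [altLoop_nil_str]
  · simp only [h, if_false]
    exact loops_eq ss ls
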